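-- pv_equiv track=rewrite | github.com/AnneDirkson/ConversationAwareFiltering | src/BERT_CRF_DiscourseFeatures.py | reformat_labels_blend
-- ===== SOURCE A (Python) =====
-- def reformat_labels_blend(lbls, startp):
--     out = []
--     temp= []
--     for a,b in zip(lbls, startp):
--         if b == 1:
--             out.append(temp)
--             temp = []
--             temp.append(str(a))
--         else:
--             temp.append(str(a))
--     out.append(temp)
--     return out
-- ===== SOURCE B (Python) =====
-- def reformat_labels_blend(lbls, startp):
--     n = min(len(lbls), len(startp))
--     strs = [str(x) for x in lbls[:n]]
--     bounds = [i for i in range(n) if startp[i] == 1]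
--     out = []
--     prev = 0
--     for b in bounds:
--         out.append(strs[prev:b])
--         prev = b
--     out.append(strs[prev:n])
--     return out
-- ===== Notes on version B (the rewrite author's own statement) =====
-- stated objective: alternative
-- what changed: Replaces the running-buffer accumulation over zip(lbls,startp) with a two-phase computation: first collect the boundary indices where startp[i]==1, then build each group by slicing the pre-stringified prefix between consecutive boundaries.
import Mathlib
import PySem

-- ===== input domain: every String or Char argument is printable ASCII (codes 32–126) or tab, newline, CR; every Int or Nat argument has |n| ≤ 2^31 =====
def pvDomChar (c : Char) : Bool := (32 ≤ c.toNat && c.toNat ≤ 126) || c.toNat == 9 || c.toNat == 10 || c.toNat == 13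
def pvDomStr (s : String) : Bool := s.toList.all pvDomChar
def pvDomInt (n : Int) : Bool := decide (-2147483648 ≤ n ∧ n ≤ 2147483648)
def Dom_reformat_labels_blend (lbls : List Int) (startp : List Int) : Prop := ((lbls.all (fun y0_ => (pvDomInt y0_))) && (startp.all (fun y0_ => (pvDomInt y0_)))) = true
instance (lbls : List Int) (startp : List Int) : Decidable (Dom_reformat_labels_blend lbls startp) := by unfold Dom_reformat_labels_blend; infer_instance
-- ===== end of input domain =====

-- B changes the decomposition: boundary-index table + slicing instead of A's running buffer (alternative, same cost).

-- ===== PORT A =====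
def reformat_labels_blend (lbls : List Int) (startp : List Int) : List (List String) :=
  let s := (lbls.zip startp).foldl
    (fun (st : List (List String) × List String) ab =>
      if ab.2 == 1 then (st.1 ++ [st.2], [PySem.Int.toStr ab.1])
      else (st.1, st.2 ++ [PySem.Int.toStr ab.1])) ([], [])
  s.1 ++ [s.2]

-- ===== PORT B =====
def reformat_labels_blend_alt (lbls : List Int) (startp : List Int) : List (List String) :=
  let n : Int := min (lbls.length : Int) (startp.length : Int)
  let strs := (PySem.List.slice lbls none (some n)).map PySem.Int.toStr
  let bounds := (PySem.List.pyRange 0 n 1).filter (fun i => PySem.List.pyGetD startp i 0 == 1)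
  let s := bounds.foldl
    (fun (st : List (List String) × Int) b =>
      (st.1 ++ [PySem.List.slice strs (some st.2) (some b)], b)) ([], 0)
  s.1 ++ [PySem.List.slice strs (some s.2) (some n)]

-- ===== PRECONDITION & SPEC =====
def Spec_reformat_labels_blend (lbls : List Int) (startp : List Int) (out : List (List String)) : Prop := out = reformat_labels_blend_alt lbls startp
instance (lbls : List Int) (startp : List Int) (out : List (List String)) : Decidable (Spec_reformat_labels_blend lbls startp out) := by unfold Spec_reformat_labels_blend; infer_instance

-- ===== CLAIM (what is proved, stated in full; the proofs are below) =====
def Claim_equal_reformat_labels_blend : Prop := ∀ (lbls : List Int) (startp : List Int), Dom_reformat_labels_blend lbls startp → Spec_reformat_labels_blend lbls startp (reformat_labels_blend lbls startp)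

-- ===== LEMMAS AND PROOFS =====

-- common abstract description: the list of groups over the zipped pairs
def pvCons (s : String) : List (List String) → List (List String)
  | [] => [[s]]
  | g :: gs => (s :: g) :: gs

def pvGroups : List (Int × Int) → List (List String)
  | [] => [[]]
  | (a, b) :: r =>
    if b == 1 then [] :: pvCons (PySem.Int.toStr a) (pvGroups r)
    else pvCons (PySem.Int.toStr a) (pvGroups r)

def pvConsAll (t : List String) : List (List String) → List (List String)
  | [] => [t]
  | g :: gs => (t ++ g) :: gs

theorem pvConsAll_singleton (s : String) (gs : List (List String)) :
    pvConsAll [s] gs = pvCons s gs := by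
  cases gs <;> simp [pvConsAll, pvCons]

theorem pvConsAll_append (t : List String) (s : String) (gs : List (List String)) :
    pvConsAll (t ++ [s]) gs = pvConsAll t (pvCons s gs) := by
  cases gs <;> simp [pvConsAll, pvCons]

-- A's fold unrolls to pvConsAll/pvGroups
theorem lemA (p : List (Int × Int)) (out : List (List String)) (temp : List String) :
    (p.foldl
      (fun (st : List (List String) × List String) ab =>
        if ab.2 == 1 then (st.1 ++ [st.2], [PySem.Int.toStr ab.1])
        else (st.1, st.2 ++ [PySem.Int.toStr ab.1])) (out, temp)).1
      ++ [(p.foldl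
      (fun (st : List (List String) × List String) ab =>
        if ab.2 == 1 then (st.1 ++ [st.2], [PySem.Int.toStr ab.1])
        else (st.1, st.2 ++ [PySem.Int.toStr ab.1])) (out, temp)).2]
    = out ++ pvConsAll temp (pvGroups p) := by
  induction p generalizing out temp with
  | nil => simp [pvGroups, pvConsAll]
  | cons ab r ih =>
    obtain ⟨a, b⟩ := ab
    by_cases hb : (b == 1) = true
    · simp only [List.foldl_cons, if_pos hb]
      rw [ih]
      simp only [pvGroups, if_pos hb, pvConsAll_singleton]
      cases pvGroups r <;> simp [pvConsAll, pvCons]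
    · simp only [List.foldl_cons, if_neg hb]
      rw [ih, pvConsAll_append]
      simp [pvGroups, hb]

theorem pvGroups_ne_nil (p : List (Int × Int)) : pvGroups p ≠ [] := by
  cases p with
  | nil => simp [pvGroups]
  | cons ab r =>
    obtain ⟨a, b⟩ := ab
    by_cases hb : b == 1 <;> simp [pvGroups, hb] <;> cases pvGroups r <;> simp [pvCons]

-- B-side abstract machinery (Nat indices)
def pvBnds : List (Int × Int) → List Nat
  | [] => []
  | (_, b) :: r => (if b == 1 then [0] else []) ++ (pvBnds r).map (· + 1)

def pvCut (strs : List String) (prev : Nat) : List Nat → List (List String)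
  | [] => [strs.drop prev]
  | b :: bs => ((strs.take b).drop prev) :: pvCut strs b bs

theorem pvCut_shift (s : String) (strs : List String) (bs : List Nat) (k : Nat) :
    pvCut (s :: strs) (k + 1) (bs.map (· + 1)) = pvCut strs k bs := by
  induction bs generalizing k with
  | nil => simp [pvCut]
  | cons b bs ih => simp [pvCut, ih, List.take_succ_cons]

theorem pvCut_head (s : String) (strs : List String) (bs : List Nat) :
    pvCut (s :: strs) 0 (bs.map (· + 1)) = pvCons s (pvCut strs 0 bs) := by
  cases bs with
  | nil => simp [pvCut, pvCons]
  | cons b bs => simp [pvCut, pvCons, pvCut_shift, List.take_succ_cons]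

theorem pvCut_groups (p : List (Int × Int)) :
    pvCut (p.map (fun x => PySem.Int.toStr x.1)) 0 (pvBnds p) = pvGroups p := by
  induction p with
  | nil => simp [pvCut, pvBnds, pvGroups]
  | cons ab r ih =>
    obtain ⟨a, b⟩ := ab
    by_cases hb : b == 1
    · simp only [pvBnds, pvGroups, hb, if_pos, List.map_cons, List.singleton_append]
      rw [pvCut, pvCut_head, ih]
      simp
    · simp only [pvBnds, pvGroups, hb, if_neg, Bool.false_eq_true, not_false_iff,
        List.map_cons, List.nil_append]
      rw [pvCut_head, ih]

-- B's fold over Int bounds equals pvCut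
theorem lemB (strs : List String) (bs : List Nat) (out : List (List String)) (k : Nat) :
    (((bs.map (Nat.cast : Nat → Int)).foldl
      (fun (st : List (List String) × Int) b =>
        (st.1 ++ [PySem.List.slice strs (some st.2) (some b)], b)) (out, (k : Int))).1
      ++ [PySem.List.slice strs
            (some ((bs.map (Nat.cast : Nat → Int)).foldl
              (fun (st : List (List String) × Int) b =>
                (st.1 ++ [PySem.List.slice strs (some st.2) (some b)], b)) (out, (k : Int))).2)
            (some (strs.length : Int))])
    = out ++ pvCut strs k bs := by
  induction bs generalizing out k with
  | nil =>
    simp only [List.map_nil, List.foldl_nil, pvCut]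
    rw [PySem.List.slice_natCast]
    simp [List.take_of_length_le]
  | cons b bs ih =>
    simp only [List.map_cons, List.foldl_cons]
    rw [ih]
    simp [pvCut, PySem.List.slice_natCast, List.drop_take]

-- zip projections
theorem map_fst_zip_take (l1 l2 : List Int) :
    (l1.zip l2).map Prod.fst = l1.take (l1.zip l2).length := by
  induction l1 generalizing l2 with
  | nil => simp
  | cons a l1 ih =>
    cases l2 with
    | nil => simp
    | cons b l2 => simp [ih]

-- the boundary list of the port equals pvBnds (Nat level first)
theorem bnds_nat (l1 l2 : List Int) :
    (List.range (l1.zip l2).length).filter (fun k => l2.getD k 0 == 1)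
      = pvBnds (l1.zip l2) := by
  induction l1 generalizing l2 with
  | nil => simp [pvBnds]
  | cons a l1 ih =>
    cases l2 with
    | nil => simp [pvBnds]
    | cons b l2 =>
      simp only [List.zip_cons_cons, List.length_cons, List.range_succ_eq_map,
        List.filter_cons, List.filter_map, Function.comp_def, List.getD_cons_succ,
        List.getD_cons_zero, pvBnds]
      rw [ih]
      by_cases hb : (b == 1) = true <;> simp [hb]

-- assembling the two sides
theorem main_eq (lbls startp : List Int) :
    ((lbls.zip startp).foldl
      (fun (st : List (List String) × List String) ab =>
        if ab.2 == 1 then (st.1 ++ [st.2], [PySem.Int.toStr ab.1])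
        else (st.1, st.2 ++ [PySem.Int.toStr ab.1])) ([], [])).1
    ++ [((lbls.zip startp).foldl
      (fun (st : List (List String) × List String) ab =>
        if ab.2 == 1 then (st.1 ++ [st.2], [PySem.Int.toStr ab.1])
        else (st.1, st.2 ++ [PySem.Int.toStr ab.1])) ([], [])).2]
    =
    (((PySem.List.pyRange 0 (min (lbls.length : Int) (startp.length : Int)) 1).filter
        (fun i => PySem.List.pyGetD startp i 0 == 1)).foldl
      (fun (st : List (List String) × Int) b =>
        (st.1 ++ [PySem.List.slice
            ((PySem.List.slice lbls none (some (min (lbls.length : Int) (startp.length : Int)))).map PySem.Int.toStr)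
            (some st.2) (some b)], b)) ([], 0)).1
    ++ [PySem.List.slice
          ((PySem.List.slice lbls none (some (min (lbls.length : Int) (startp.length : Int)))).map PySem.Int.toStr)
          (some (((PySem.List.pyRange 0 (min (lbls.length : Int) (startp.length : Int)) 1).filter
              (fun i => PySem.List.pyGetD startp i 0 == 1)).foldl
            (fun (st : List (List String) × Int) b =>
              (st.1 ++ [PySem.List.slice
                  ((PySem.List.slice lbls none (some (min (lbls.length : Int) (startp.length : Int)))).map PySem.Int.toStr)
                  (some st.2) (some b)], b)) ([], 0)).2)
          (some (min (lbls.length : Int) (startp.length : Int)))] := by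
  have hn : min (lbls.length : Int) (startp.length : Int) = (((lbls.zip startp).length : Nat) : Int) := by
    rw [List.length_zip]; push_cast; rfl
  have hstrs : (PySem.List.slice lbls none (some (min (lbls.length : Int) (startp.length : Int)))).map PySem.Int.toStr
      = (lbls.zip startp).map (fun x => PySem.Int.toStr x.1) := by
    rw [hn, PySem.List.slice_to_natCast, ← map_fst_zip_take lbls startp, List.map_map]
    rfl
  have hbounds : ((PySem.List.pyRange 0 (min (lbls.length : Int) (startp.length : Int)) 1).filter
        (fun i => PySem.List.pyGetD startp i 0 == 1))
      = (pvBnds (lbls.zip startp)).map (Nat.cast : Nat → Int) := by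
    have ht : (min (lbls.length : Int) (startp.length : Int) - 0).toNat = (lbls.zip startp).length := by
      rw [List.length_zip]; omega
    rw [PySem.List.pyRange_one, ht, List.filter_map, ← bnds_nat lbls startp]
    simp [Function.comp_def]
  rw [lemA, hstrs, hbounds]
  have hlen : (min (lbls.length : Int) (startp.length : Int))
      = ((((lbls.zip startp).map (fun x => PySem.Int.toStr x.1)).length : Nat) : Int) := by
    rw [List.length_map]; exact hn
  rw [hlen]
  have hB := lemB ((lbls.zip startp).map (fun x => PySem.Int.toStr x.1)) (pvBnds (lbls.zip startp)) [] 0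
  simp only [Nat.cast_zero] at hB
  rw [hB, pvCut_groups]
  rcases hg : pvGroups (lbls.zip startp) with _ | ⟨g, gs⟩
  · exact absurd hg (pvGroups_ne_nil _)
  · simp [pvConsAll]

-- ===== VERDICT (by name: the statement is the Claim_ definition above) =====
theorem reformat_labels_blend_spec : Claim_equal_reformat_labels_blend := by
  intro lbls startp _
  exact main_eq lbls startp
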